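-- pv_equiv track=rewrite | github.com/makimaki1006/kaigo-bi-platform | scripts/sato_comparison_analysis.py | vtt_to_text
-- ===== SOURCE A (Python) =====
-- def vtt_to_text(vtt):
--     lines = vtt.strip().split("\n")
--     result = []
--     i = 0
--     while i < len(lines):
--         line = lines[i].strip()
--         if "-->" in line:
--             timestamp = line.split("-->")[0].strip()
--             text_lines = []
--             i += 1
--             while i < len(lines) and lines[i].strip() and "-->" not in lines[i]:
--                 text_lines.append(lines[i].strip())
--                 i += 1
--             if text_lines:
--                 result.append(f"[{timestamp}] {' '.join(text_lines)}")
--             continue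
--         i += 1
--     return "\n".join(result)
-- ===== SOURCE B (Python) =====
-- def _flush(out, ts, buf):
--     if ts is not None and buf:
--         out.append(f"[{ts}] {' '.join(buf)}")
--
-- def vtt_to_text(vtt):
--     out = []
--     ts = None
--     buf = []
--     for raw in vtt.strip().split("\n"):
--         if "-->" in raw:
--             _flush(out, ts, buf)
--             ts = raw.strip().split("-->")[0].strip()
--             buf = []
--         else:
--             s = raw.strip()
--             if s:
--                 if ts is not None:
--                     buf.append(s)
--             else:
--                 _flush(out, ts, buf)
--                 ts = None
--                 buf = []
--     _flush(out, ts, buf)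
--     return "\n".join(out)
-- ===== Notes on version B (the rewrite author's own statement) =====
-- stated objective: simpler
-- what changed: A's nested while loops over an explicit line index (an inner scan consuming the cue's text lines) are replaced by a single-pass state machine folded over the lines, carrying (current timestamp, text buffer, output) and flushing on a cue line, a blank line, or end of input.
import Mathlib
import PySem

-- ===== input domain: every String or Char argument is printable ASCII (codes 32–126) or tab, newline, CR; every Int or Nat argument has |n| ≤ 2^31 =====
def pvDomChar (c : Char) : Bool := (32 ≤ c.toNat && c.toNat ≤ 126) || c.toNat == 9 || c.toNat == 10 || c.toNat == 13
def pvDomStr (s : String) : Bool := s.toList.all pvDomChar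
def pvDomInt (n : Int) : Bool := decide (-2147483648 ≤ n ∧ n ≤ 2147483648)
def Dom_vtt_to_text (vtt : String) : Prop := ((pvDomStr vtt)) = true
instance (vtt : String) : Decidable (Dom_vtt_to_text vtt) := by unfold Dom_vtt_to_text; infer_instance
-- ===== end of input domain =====

-- B replaces A's nested while loops over an index by a single-pass state machine
-- (current timestamp, text buffer, output) folded over the lines; objective: simpler.

-- shared primitives (both Pythons contain the same literal sub-expressions)
def pvArrow : List Char := ['-', '-', '>']

def pvHasArrow (l : List Char) : Bool := PySem.Chars.isIn pvArrow l

-- line.split("-->")[0].strip()  (split with a nonempty separator is never empty, so [0] is total)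
def pvTs (l : List Char) : List Char :=
  PySem.Chars.strip ((PySem.Chars.splitOn l pvArrow).getD 0 [])

-- f"[{timestamp}] {' '.join(text_lines)}"
def pvFmt (ts : List Char) (txt : List (List Char)) : List Char :=
  '[' :: ts ++ ']' :: ' ' :: PySem.Chars.join [' '] txt

-- ===== PORT A =====
-- inner while: collect stripped lines while non-blank and without "-->"; return (text_lines, remaining lines)
def pvInnerA : List (List Char) → List (List Char) × List (List Char)
  | [] => ([], [])
  | l :: rest =>
    if !(PySem.Chars.strip l).isEmpty && !pvHasArrow l then
      let p := pvInnerA rest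
      (PySem.Chars.strip l :: p.1, p.2)
    else ([], l :: rest)

theorem pvInnerA_snd_length (xs : List (List Char)) : (pvInnerA xs).2.length ≤ xs.length := by
  induction xs with
  | nil => simp [pvInnerA]
  | cons l rest ih =>
    simp only [pvInnerA]
    split
    · simpa using Nat.le_succ_of_le ih
    · simp

-- outer while over the line index
def pvALoop : List (List Char) → List (List Char)
  | [] => []
  | l :: rest =>
    if pvHasArrow (PySem.Chars.strip l) then
      if (pvInnerA rest).1.isEmpty then pvALoop (pvInnerA rest).2
      else pvFmt (pvTs (PySem.Chars.strip l)) (pvInnerA rest).1 :: pvALoop (pvInnerA rest).2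
    else pvALoop rest
  termination_by xs => xs.length
  decreasing_by
  · have := pvInnerA_snd_length rest; simp; omega
  · have := pvInnerA_snd_length rest; simp; omega
  · simp

def vtt_to_text (vtt : String) : String :=
  String.ofList (PySem.Chars.join ['\n']
    (pvALoop (PySem.Chars.splitOn (PySem.Chars.strip vtt.toList) ['\n'])))

-- ===== PORT B =====
-- _flush(out, ts, buf)
def pvFlush (ts? : Option (List Char)) (buf : List (List Char)) (out : List (List Char)) :
    List (List Char) :=
  match ts?, buf with
  | some ts, _ :: _ => out ++ [pvFmt ts buf]
  | _, _ => out

-- one step of B's state machine; state = (out, ts, buf)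
def pvStep (st : List (List Char) × Option (List Char) × List (List Char)) (raw : List Char) :
    List (List Char) × Option (List Char) × List (List Char) :=
  match st with
  | (out, ts?, buf) =>
    if pvHasArrow raw then
      (pvFlush ts? buf out, some (pvTs (PySem.Chars.strip raw)), [])
    else
      if !(PySem.Chars.strip raw).isEmpty then
        if ts?.isSome then (out, ts?, buf ++ [PySem.Chars.strip raw]) else (out, ts?, buf)
      else (pvFlush ts? buf out, none, [])

def vtt_to_text_alt (vtt : String) : String :=
  let st := (PySem.Chars.splitOn (PySem.Chars.strip vtt.toList) ['\n']).foldl pvStep ([], none, [])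
  String.ofList (PySem.Chars.join ['\n'] (pvFlush st.2.1 st.2.2 st.1))

-- ===== PRECONDITION & SPEC =====
def Spec_vtt_to_text (vtt : String) (out : String) : Prop := out = vtt_to_text_alt vtt
instance (vtt : String) (out : String) : Decidable (Spec_vtt_to_text vtt out) := by unfold Spec_vtt_to_text; infer_instance

-- ===== CLAIM (what is proved, stated in full; the proofs are below) =====
def Claim_equal_vtt_to_text : Prop := ∀ (vtt : String), Dom_vtt_to_text vtt → Spec_vtt_to_text vtt (vtt_to_text vtt)

-- ===== LEMMAS AND PROOFS =====

-- "-->" contains no whitespace, so stripping a line does not change whether it contains "-->"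
theorem pvArrow_infix_dropWhile (c0 : Char) (tl : List Char)
    (hc : PySem.Chars.isspace c0 = false) :
    ∀ l : List Char, (c0 :: tl) <:+: l → (c0 :: tl) <:+: l.dropWhile PySem.Chars.isspace := by
  intro l
  induction l with
  | nil => intro h; simpa using h.length_le
  | cons a l ih =>
    intro h
    by_cases ha : PySem.Chars.isspace a = true
    · rw [List.dropWhile_cons_of_pos ha]
      rcases List.infix_cons_iff.mp h with hpre | hinf
      · exfalso
        have : c0 = a := (List.cons_prefix_cons.mp hpre).1
        rw [this] at hc; simp [ha] at hc
      · exact ih hinf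
    · rw [List.dropWhile_cons_of_neg ha]
      exact h

theorem pvHasArrow_strip (l : List Char) :
    pvHasArrow (PySem.Chars.strip l) = pvHasArrow l := by
  rw [Bool.eq_iff_iff]
  unfold pvHasArrow
  rw [PySem.Chars.isIn_iff_infix, PySem.Chars.isIn_iff_infix]
  constructor
  · intro h
    refine h.trans ?_
    unfold PySem.Chars.strip PySem.Chars.rstrip PySem.Chars.lstrip
    have hs1 : List.dropWhile PySem.Chars.isspace l <:+ l := List.dropWhile_suffix _
    have hs2 : (List.dropWhile PySem.Chars.isspace
        (List.dropWhile PySem.Chars.isspace l).reverse).reverse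
        <+: List.dropWhile PySem.Chars.isspace l := by
      rw [← List.reverse_suffix]
      simpa using List.dropWhile_suffix (p := PySem.Chars.isspace)
        (l := (List.dropWhile PySem.Chars.isspace l).reverse)
    exact hs2.isInfix.trans hs1.isInfix
  · intro h
    unfold PySem.Chars.strip PySem.Chars.rstrip PySem.Chars.lstrip
    have h1 : pvArrow <:+: List.dropWhile PySem.Chars.isspace l :=
      pvArrow_infix_dropWhile '-' ['-', '>'] (by decide) l h
    have h2 : pvArrow.reverse <:+: (List.dropWhile PySem.Chars.isspace l).reverse := by
      simpa using h1.reverse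
    have h3 : pvArrow.reverse <:+:
        List.dropWhile PySem.Chars.isspace (List.dropWhile PySem.Chars.isspace l).reverse :=
      pvArrow_infix_dropWhile '>' ['-', '-'] (by decide) _ h2
    simpa using h3.reverse

-- proof-side finalizer name for B's closing flush
def pvFinal (st : List (List Char) × Option (List Char) × List (List Char)) : List (List Char) :=
  pvFlush st.2.1 st.2.2 st.1

-- B's final flush of the fold, related to A's two loops: the two invariants, proved together
theorem pvStateMachine (lines : List (List Char)) :
    (∀ out, pvFinal (lines.foldl pvStep (out, none, [])) = out ++ pvALoop lines) ∧
    (∀ ts buf out, pvFinal (lines.foldl pvStep (out, some ts, buf)) =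
      pvFlush (some ts) (buf ++ (pvInnerA lines).1) out ++ pvALoop (pvInnerA lines).2) := by
  induction lines with
  | nil =>
    constructor
    · intro out; simp [pvFinal, pvFlush, pvALoop]
    · intro ts buf out; simp [pvFinal, pvInnerA, pvALoop]
  | cons l rest ih =>
    obtain ⟨ihn, ihs⟩ := ih
    constructor
    · intro out
      by_cases hA : pvHasArrow l = true
      · simp only [List.foldl_cons, pvStep, hA, if_pos]
        rw [ihs]
        rw [pvALoop]
        rw [pvHasArrow_strip l, hA, if_pos rfl]
        simp only [List.nil_append]
        cases hp : (pvInnerA rest).1 with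
        | nil => simp [pvFlush]
        | cons x xs => simp [pvFlush]
      · by_cases hE : (PySem.Chars.strip l).isEmpty = true
        · simp only [List.foldl_cons, pvStep, hA, hE, Bool.not_true, if_neg, Bool.false_eq_true,
            not_false_iff]
          rw [ihn]
          rw [pvALoop, pvHasArrow_strip l]
          simp [hA, pvFlush]
        · simp only [List.foldl_cons, pvStep, hA, hE, Bool.not_false, if_neg, Bool.false_eq_true,
            not_false_iff, ite_true, Option.isSome_none]
          rw [ihn]
          rw [pvALoop, pvHasArrow_strip l]
          simp [hA]
    · intro ts buf out
      by_cases hA : pvHasArrow l = true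
      · simp only [List.foldl_cons, pvStep, hA, if_pos]
        rw [ihs]
        have hInner : pvInnerA (l :: rest) = ([], l :: rest) := by
          rw [pvInnerA]; simp [hA]
        rw [hInner]
        rw [pvALoop]
        rw [pvHasArrow_strip l, hA, if_pos rfl]
        simp only [List.nil_append]
        cases hp : (pvInnerA rest).1 with
        | nil => simp [pvFlush]
        | cons x xs => simp [pvFlush, List.append_assoc]
      · by_cases hE : (PySem.Chars.strip l).isEmpty = true
        · simp only [List.foldl_cons, pvStep, hA, hE, Bool.not_true, Bool.false_eq_true,
            not_false_iff, if_neg]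
          rw [ihn]
          have hInner : pvInnerA (l :: rest) = ([], l :: rest) := by
            rw [pvInnerA]; simp [hE]
          rw [hInner]
          rw [pvALoop, pvHasArrow_strip l]
          simp [hA]
        · simp only [List.foldl_cons, pvStep, hA, hE, Bool.not_false, Bool.false_eq_true,
            not_false_iff, if_neg, ite_true, Option.isSome_some]
          rw [ihs]
          have hInner : pvInnerA (l :: rest) =
              (PySem.Chars.strip l :: (pvInnerA rest).1, (pvInnerA rest).2) := by
            rw [pvInnerA]; simp [hA, hE]
          rw [hInner]
          have : buf ++ [PySem.Chars.strip l] ++ (pvInnerA rest).1 =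
              buf ++ (PySem.Chars.strip l :: (pvInnerA rest).1) := by
            simp [List.append_assoc]
          rw [this]

-- ===== VERDICT (by name: the statement is the Claim_ definition above) =====
theorem vtt_to_text_spec : Claim_equal_vtt_to_text := by
  intro vtt _
  have h := (pvStateMachine (PySem.Chars.splitOn (PySem.Chars.strip vtt.toList) ['\n'])).1 []
  simp only [pvFinal] at h
  simp only [Spec_vtt_to_text, vtt_to_text, vtt_to_text_alt]
  rw [h]
  simp
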